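-- pv_equiv track=rewrite | github.com/981377660LMT/algorithm-study | 19_数学/中位数与平均数/2950. 可整除子串的数量-平均数平移技巧.py | countDivisibleSubstrings
-- ===== SOURCE A (Python) =====
-- from collections import defaultdict
--
-- MAPPING = {
--     "a": 1,
--     "b": 1,
--     "c": 2,
--     "d": 2,
--     "e": 2,
--     "f": 3,
--     "g": 3,
--     "h": 3,
--     "i": 4,
--     "j": 4,
--     "k": 4,
--     "l": 5,
--     "m": 5,
--     "n": 5,
--     "o": 6,
--     "p": 6,
--     "q": 6,
--     "r": 7,
--     "s": 7,
--     "t": 7,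
--     "u": 8,
--     "v": 8,
--     "w": 8,
--     "x": 9,
--     "y": 9,
--     "z": 9,
-- }
--
-- def countDivisibleSubstrings(word: str) -> int:
--     def solve(mean: int) -> int:
--         preSum = defaultdict(int, {0: 1})
--         res, curSum = 0, 0
--         for c in word:
--             curSum += MAPPING[c] - mean
--             res += preSum[curSum]
--             preSum[curSum] += 1
--         return res
--
--     return sum(solve(mean) for mean in range(1, 10))
-- ===== SOURCE B (Python) =====
-- MAPPING = {
--     "a": 1, "b": 1, "c": 2, "d": 2, "e": 2, "f": 3, "g": 3, "h": 3,
--     "i": 4, "j": 4, "k": 4, "l": 5, "m": 5, "n": 5, "o": 6, "p": 6,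
--     "q": 6, "r": 7, "s": 7, "t": 7, "u": 8, "v": 8, "w": 8, "x": 9,
--     "y": 9, "z": 9,
-- }
--
-- def countDivisibleSubstrings(word: str) -> int:
--     # Brute force: for every start i, extend the substring one character at a
--     # time keeping its sum s and length L; it has an integer average iff L | s.
--     n = len(word)
--     ans = 0
--     for i in range(n):
--         s = 0
--         L = 0
--         for j in range(i, n):
--             s += MAPPING[word[j]]
--             L += 1
--             if s % L == 0:
--                 ans += 1
--     return ans
-- ===== Notes on version B (the rewrite author's own statement) =====
-- stated objective: simpler
-- what changed: Replaced the nine per-mean prefix-sum hashmap passes with one plain double loop that keeps a running sum per start index and counts a substring when its sum is divisible by its length, which subsumes all nine means.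
import Mathlib
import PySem

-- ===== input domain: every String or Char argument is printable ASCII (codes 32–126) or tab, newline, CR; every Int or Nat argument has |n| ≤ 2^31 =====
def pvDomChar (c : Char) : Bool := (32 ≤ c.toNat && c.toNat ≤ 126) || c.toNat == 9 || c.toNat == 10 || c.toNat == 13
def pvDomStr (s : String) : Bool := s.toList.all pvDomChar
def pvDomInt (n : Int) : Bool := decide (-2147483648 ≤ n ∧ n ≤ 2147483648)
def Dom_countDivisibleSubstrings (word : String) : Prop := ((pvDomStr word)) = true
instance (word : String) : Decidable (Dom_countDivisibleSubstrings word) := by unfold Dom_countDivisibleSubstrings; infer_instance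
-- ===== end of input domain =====

-- B replaces the nine per-mean prefix-sum hashmap passes by one plain double loop
-- counting substrings whose mapped-value sum is divisible by their length (objective: simpler).

-- module-level constant MAPPING (shared by A and B, as in the Python module)
def pyMAPPING : PySem.Dict Char Int := PySem.Dict.ofList
  [('a', 1), ('b', 1), ('c', 2), ('d', 2), ('e', 2), ('f', 3), ('g', 3), ('h', 3),
   ('i', 4), ('j', 4), ('k', 4), ('l', 5), ('m', 5), ('n', 5), ('o', 6), ('p', 6),
   ('q', 6), ('r', 7), ('s', 7), ('t', 7), ('u', 8), ('v', 8), ('w', 8), ('x', 9),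
   ('y', 9), ('z', 9)]

-- ===== PORT A =====
-- MAPPING[c] is ported as pyMAPPING.getD c 0; Pre_ excludes the inputs where Python
-- raises KeyError (any character that is not a lowercase ASCII letter).
def countDivisibleSubstrings (word : String) : Int :=
  let solve : Int → Int := fun mean =>
    let st := word.toList.foldl
      (fun (st : PySem.Dict Int Int × Int × Int) c =>
        let curSum := st.2.2 + pyMAPPING.getD c 0 - mean
        let res := st.2.1 + st.1.getD curSum 0
        let preSum := st.1.modify curSum 0 (· + 1)
        (preSum, res, curSum))
      (PySem.Dict.empty.insert 0 1, 0, 0)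
    st.2.1
  ((PySem.List.pyRange 1 10 1).map solve).sum

-- ===== PORT B =====
-- transliteration of Source B: for each start i keep running sum s and length L,
-- count when s % L == 0.
def countDivisibleSubstrings_alt (word : String) : Int :=
  let n : Int := PySem.Str.len word
  let cs := word.toList
  (PySem.List.pyRange 0 n 1).foldl
    (fun ans i =>
      ((PySem.List.pyRange i n 1).foldl
        (fun (st : Int × Int × Int) j =>
          let s := st.1 + pyMAPPING.getD (PySem.List.pyGetD cs j ' ') 0
          let L := st.2.1 + 1
          let a := if PySem.Int.mod s L = 0 then st.2.2 + 1 else st.2.2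
          (s, L, a))
        (0, 0, ans)).2.2)
    0

-- ===== PRECONDITION & SPEC =====
-- Pre_ excludes exactly the inputs on which Python A raises KeyError: strings
-- containing any character that is not a lowercase ASCII letter (code 97..122).
def Pre_countDivisibleSubstrings (word : String) : Prop :=
  word.toList.all (fun c => 97 ≤ c.toNat && c.toNat ≤ 122) = true
instance (word : String) : Decidable (Pre_countDivisibleSubstrings word) := by
  unfold Pre_countDivisibleSubstrings; infer_instance

def pvWitness_countDivisibleSubstrings : String := "abcz"

def Spec_countDivisibleSubstrings (word : String) (out : Int) : Prop := out = countDivisibleSubstrings_alt word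
instance (word : String) (out : Int) : Decidable (Spec_countDivisibleSubstrings word out) := by unfold Spec_countDivisibleSubstrings; infer_instance

-- ===== CLAIM (what is proved, stated in full; the proofs are below) =====
def Claim_equal_countDivisibleSubstrings : Prop := ∀ (word : String), Dom_countDivisibleSubstrings word → Pre_countDivisibleSubstrings word → Spec_countDivisibleSubstrings word (countDivisibleSubstrings word)

-- ===== LEMMAS AND PROOFS =====
def pvMapv (c : Char) : Int := pyMAPPING.getD c 0

lemma pvMapv_bound (c : Char) (h1 : 97 ≤ c.toNat) (h2 : c.toNat ≤ 122) :
    1 ≤ pvMapv c ∧ pvMapv c ≤ 9 := by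
  rw [← Char.ofNat_toNat c]
  revert h1 h2
  generalize c.toNat = n
  intro h1 h2
  interval_cases n <;> decide

lemma pvListSumRange (n : ℕ) (f : ℕ → Int) :
    ((List.range n).map f).sum = ∑ k ∈ Finset.range n, f k := by
  induction n with
  | zero => simp
  | succ n ih => rw [List.range_succ, Finset.sum_range_succ, ← ih]; simp

lemma pvShiftSum (t : List Int) (m : Int) :
    (t.map (fun x => x - m)).sum = t.sum - m * t.length := by
  induction t with
  | nil => simp
  | cons x t ih => simp [ih]; ring

lemma pvSumBounds (t : List Int) (h : ∀ x ∈ t, 1 ≤ x ∧ x ≤ 9) :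
    (t.length : Int) ≤ t.sum ∧ t.sum ≤ 9 * t.length := by
  induction t with
  | nil => simp
  | cons x t ih =>
    have hx := h x (by simp)
    have ht := ih (fun y hy => h y (by simp [hy]))
    simp only [List.sum_cons, List.length_cons]
    push_cast
    constructor <;> nlinarith [hx.1, hx.2, ht.1, ht.2]

def pvP (l : List Int) (k : ℕ) : Int := (l.take k).sum

lemma pvSegment (l : List Int) (i k : ℕ) :
    pvP l (i + k) - pvP l i = ((l.drop i).take k).sum := by
  unfold pvP
  rw [List.take_add, List.sum_append]
  ring

def pvPrefs : List Int → Int → List Int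
  | [], _ => []
  | x :: t, s => (s + x) :: pvPrefs t (s + x)

def pvPairCount : List Int → List Int → Int
  | _, [] => 0
  | seen, p :: ps => (seen.count p : Int) + pvPairCount (p :: seen) ps

def pvInner : List Int → Int → Int → Int
  | [], _, _ => 0
  | x :: t, s, L => (if PySem.Int.mod (s + x) (L + 1) = 0 then (1:Int) else 0) + pvInner t (s + x) (L + 1)

-- loop bodies of the two ports, as named helpers for the proofs
def pvStepA (st : PySem.Dict Int Int × Int × Int) (x : Int) : PySem.Dict Int Int × Int × Int :=
  (st.1.modify (st.2.2 + x) 0 (· + 1), st.2.1 + st.1.getD (st.2.2 + x) 0, st.2.2 + x)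

def pvStepB (st : Int × Int × Int) (x : Int) : Int × Int × Int :=
  (st.1 + x, st.2.1 + 1,
    if PySem.Int.mod (st.1 + x) (st.2.1 + 1) = 0 then st.2.2 + 1 else st.2.2)


lemma pvPrefs_length (xs : List Int) : ∀ s, (pvPrefs xs s).length = xs.length := by
  induction xs with
  | nil => simp [pvPrefs]
  | cons x t ih => intro s; simp [pvPrefs, ih]

lemma pvPrefs_getD (xs : List Int) : ∀ (j : ℕ), j < xs.length → ∀ s,
    (pvPrefs xs s).getD j 0 = s + (xs.take (j+1)).sum := by
  induction xs with
  | nil => simp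
  | cons x t ih =>
    intro j hj s
    cases j with
    | zero => simp [pvPrefs]
    | succ j =>
      simp only [pvPrefs, List.getD_cons_succ, List.take_succ_cons, List.sum_cons]
      rw [ih j (by simpa using hj) (s + x)]
      ring

lemma pvPairCount_eq (ps : List Int) : ∀ seen, pvPairCount seen ps =
    ∑ j ∈ Finset.range ps.length, (((seen.count (ps.getD j 0)) : Int)
      + ∑ i ∈ Finset.range j, (if ps.getD i 0 = ps.getD j 0 then (1:Int) else 0)) := by
  induction ps with
  | nil => simp [pvPairCount]
  | cons p t ih =>
    intro seen
    simp only [pvPairCount, ih (p :: seen), List.length_cons]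
    rw [Finset.sum_range_succ']
    simp only [List.getD_cons_succ, List.getD_cons_zero, Finset.range_zero,
      Finset.sum_empty, add_zero]
    rw [add_comm]
    congr 1
    apply Finset.sum_congr rfl
    intro j hj
    rw [Finset.sum_range_succ']
    simp only [List.getD_cons_succ, List.getD_cons_zero, List.count_cons]
    push_cast
    simp only [beq_iff_eq]
    ring
    
lemma pvInner_eq (ys : List Int) : ∀ s L, pvInner ys s L =
    ∑ k ∈ Finset.range ys.length,
      (if PySem.Int.mod (s + (ys.take (k+1)).sum) (L + ((k:Int)+1)) = 0 then (1:Int) else 0) := by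
  induction ys with
  | nil => simp [pvInner]
  | cons y t ih =>
    intro s L
    simp only [pvInner, ih (s + y) (L + 1), List.length_cons]
    rw [Finset.sum_range_succ']
    rw [add_comm]
    congr 1
    · apply Finset.sum_congr rfl
      intro k hk
      have h1 : s + y + (t.take (k+1)).sum = s + ((y :: t).take (k+1+1)).sum := by
        simp [List.take_succ_cons]; ring
      have h2 : L + 1 + ((k:Int)+1) = L + ((k:Int)+1+1) := by ring
      rw [h1]
      push_cast
      rw [show L + 1 + ((k:Int)+1) = L + ((k:Int)+1+1) from by ring]
    · simp

lemma pvFoldA (xs : List Int) : ∀ (d : PySem.Dict Int Int) (seen : List Int) (res cur : Int),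
    (∀ v, d.getD v 0 = (seen.count v : Int)) →
    (xs.foldl pvStepA (d, res, cur)).2.1
    = res + pvPairCount seen (pvPrefs xs cur) := by
  induction xs with
  | nil => intro d seen res cur h; simp [pvPrefs, pvPairCount]
  | cons x t ih =>
    intro d seen res cur h
    simp only [List.foldl_cons, pvPrefs, pvPairCount, pvStepA]
    rw [ih _ ((cur + x) :: seen) _ _ ?_]
    · rw [h (cur + x)]; ring
    · intro v
      rcases eq_or_ne v (cur + x) with rfl | hne
      · rw [PySem.Dict.getD_modify_self, h, List.count_cons_self]; push_cast; ring
      · rw [PySem.Dict.getD_modify_of_ne _ _ _ hne, h]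
        simp [Ne.symm hne]

lemma pvBridge (d s : Int) (hd : 0 < d) (h1 : d ≤ s) (h2 : s ≤ 9 * d) :
    (∑ m ∈ Finset.range 9, if s = (1 + (m:Int)) * d then (1:Int) else 0)
    = if PySem.Int.mod s d = 0 then 1 else 0 := by
  by_cases hdvd : d ∣ s
  · obtain ⟨q, rfl⟩ := hdvd
    have hq1 : 1 ≤ q := by nlinarith
    have hq9 : q ≤ 9 := by nlinarith
    rw [if_pos (by rw [PySem.Int.mod_eq_zero_iff_dvd]; exact ⟨q, rfl⟩)]
    have hcond : ∀ m : ℕ, (d * q = (1 + (m:Int)) * d) ↔ (m = (q - 1).toNat) := by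
      intro m
      constructor
      · intro he
        have : (m : Int) = q - 1 := by
          have := mul_right_cancel₀ (ne_of_gt hd) (by linarith [he] : q * d = (1 + (m:Int)) * d)
          linarith
        omega
      · intro he
        subst he
        have : ((q - 1).toNat : Int) = q - 1 := by omega
        rw [this]; ring
    calc (∑ m ∈ Finset.range 9, if d * q = (1 + (m:Int)) * d then (1:Int) else 0)
        = ∑ m ∈ Finset.range 9, if m = (q-1).toNat then (1:Int) else 0 := by
          apply Finset.sum_congr rfl; intro m _; simp only [hcond]
      _ = 1 := by rw [Finset.sum_ite_eq' (Finset.range 9)]; simp; omega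
  · rw [if_neg (by rw [PySem.Int.mod_eq_zero_iff_dvd]; exact hdvd)]
    apply Finset.sum_eq_zero
    intro m _
    rw [if_neg]
    intro he
    exact hdvd ⟨1 + (m:Int), by linarith⟩

lemma pvTri (n : ℕ) (f : ℕ → ℕ → Int) :
    ∑ i ∈ Finset.range n, ∑ k ∈ Finset.range (n - i), f i (i + k + 1)
    = ∑ j ∈ Finset.range (n+1), ∑ i ∈ Finset.range j, f i j := by
  induction n with
  | zero => simp
  | succ n ih =>
    rw [Finset.sum_range_succ (fun j => ∑ i ∈ Finset.range j, f i j)]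
    rw [← ih]
    rw [Finset.sum_range_succ]
    have hlast : (n + 1) - n = 1 := by omega
    rw [hlast]
    simp only [Finset.sum_range_one]
    have hsplit : ∀ i ∈ Finset.range n,
        ∑ k ∈ Finset.range (n + 1 - i), f i (i + k + 1)
        = (∑ k ∈ Finset.range (n - i), f i (i + k + 1)) + f i (n + 1) := by
      intro i hi
      have hi' : i < n := Finset.mem_range.mp hi
      have : n + 1 - i = (n - i) + 1 := by omega
      rw [this, Finset.sum_range_succ]
      congr 2
      omega
    rw [Finset.sum_congr rfl hsplit, Finset.sum_add_distrib, Finset.sum_range_succ]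
    have : n + 0 + 1 = n + 1 := by omega
    rw [this]
    ring

lemma pvCountSingleton (v : Int) :
    (([0] : List Int).count v : Int) = if v = 0 then 1 else 0 := by
  rcases eq_or_ne v 0 with rfl | h
  · simp
  · simp [h, Ne.symm h]

lemma pvSolveSum (l : List Int) (m : Int) :
    pvPairCount [0] (pvPrefs (l.map (fun x => x - m)) 0)
    = ∑ j ∈ Finset.range (l.length + 1), ∑ i ∈ Finset.range j,
        (if pvP l j - pvP l i = m * ((j:Int) - (i:Int)) then (1:Int) else 0) := by
  set xs := l.map (fun x => x - m) with hxs
  have hlen : xs.length = l.length := by simp [hxs]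
  have hgd : ∀ j < l.length, (pvPrefs xs 0).getD j 0 = pvP l (j+1) - m * ((j:Int)+1) := by
    intro j hj
    rw [pvPrefs_getD xs j (by omega) 0]
    rw [hxs, ← List.map_take, pvShiftSum]
    have : ((l.take (j+1)).length : Int) = (j:Int) + 1 := by
      rw [List.length_take]; push_cast; omega
    rw [this]
    unfold pvP; ring
  rw [pvPairCount_eq, pvPrefs_length, hlen]
  rw [Finset.sum_range_succ' (fun j => ∑ i ∈ Finset.range j,
        (if pvP l j - pvP l i = m * ((j:Int) - (i:Int)) then (1:Int) else 0))]
  simp only [Finset.range_zero, Finset.sum_empty, add_zero]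
  apply Finset.sum_congr rfl
  intro j hj
  have hj' : j < l.length := Finset.mem_range.mp hj
  push_cast
  rw [Finset.sum_range_succ' (fun i =>
        (if pvP l (j+1) - pvP l i = m * (((j:Int)+1) - (i:Int)) then (1:Int) else 0))]
  rw [hgd j hj']
  rw [pvCountSingleton]
  have hterm0 : (if pvP l (j+1) - pvP l 0 = m * (((j:Int)+1) - ((0:ℕ):Int)) then (1:Int) else 0)
      = if pvP l (j+1) - m * ((j:Int)+1) = 0 then 1 else 0 := by
    have : pvP l 0 = 0 := by simp [pvP]
    rw [this]
    push_cast
    apply if_congr _ rfl rfl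
    constructor <;> intro h <;> linarith
  rw [hterm0, add_comm]
  congr 1
  apply Finset.sum_congr rfl
  intro i hi
  rw [hgd i (by have := Finset.mem_range.mp hi; omega)]
  apply if_congr _ rfl rfl
  push_cast
  constructor <;> intro h <;> nlinarith

lemma pvDictInit : ∀ v : Int, ((PySem.Dict.empty.insert 0 1 : PySem.Dict Int Int)).getD v 0
    = ((([0] : List Int).count v : Int)) := by
  intro v
  rw [PySem.Dict.getD_insert, pvCountSingleton]
  rcases eq_or_ne v 0 with rfl | h
  · simp
  · simp [h]

lemma pvFoldB (ys : List Int) : ∀ (s L ans : Int),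
    (ys.foldl pvStepB (s, L, ans)).2.2 = ans + pvInner ys s L := by
  induction ys with
  | nil => intro s L ans; simp [pvInner]
  | cons y t ih =>
    intro s L ans
    simp only [List.foldl_cons, pvInner, pvStepB]
    rw [ih]
    split <;> ring

lemma pvA_eq (word : String) : countDivisibleSubstrings word
    = ∑ k ∈ Finset.range 9,
        pvPairCount [0] (pvPrefs ((word.toList.map pvMapv).map (fun x => x - (1 + (k:Int)))) 0) := by
  simp only [countDivisibleSubstrings]
  rw [PySem.List.pyRange_one]
  rw [List.map_map]
  rw [show ((10:Int) - 1).toNat = 9 from rfl]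
  rw [pvListSumRange]
  apply Finset.sum_congr rfl
  intro k _
  simp only [Function.comp]
  rw [PySem.List.foldl_congr_mem word.toList _
      (fun st c => pvStepA st (pvMapv c - (1 + (k:Int)))) _ ?_]
  · rw [← List.foldl_map]
    rw [List.map_map]
    rw [pvFoldA _ _ [0] 0 0 pvDictInit, zero_add]
    rfl
  · intro acc c _
    simp only [pvStepA, pvMapv]
    have h1 : acc.2.2 + pyMAPPING.getD c 0 - (1 + (k:Int))
        = acc.2.2 + (pyMAPPING.getD c 0 - (1 + (k:Int))) := by ring
    rw [h1]

lemma pvB_eq (word : String) : countDivisibleSubstrings_alt word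
    = ∑ i ∈ Finset.range word.toList.length,
        pvInner ((word.toList.map pvMapv).drop i) 0 0 := by
  simp only [countDivisibleSubstrings_alt]
  rw [PySem.Str.len_eq]
  rw [PySem.List.foldl_congr_mem _ _
      (fun (ans : Int) i => ans + pvInner ((word.toList.map pvMapv).drop i.toNat) 0 0) _ ?_]
  · rw [PySem.List.foldl_add, zero_add, PySem.List.pyRange_one, List.map_map]
    rw [show (((word.toList.length : Int)) - 0).toNat = word.toList.length from by omega]
    rw [pvListSumRange]
    apply Finset.sum_congr rfl
    intro i _
    simp only [Function.comp]
    norm_num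
  · intro ans i hi
    have hi' : 0 ≤ i := by
      have := (PySem.List.mem_pyRange_one).mp hi
      omega
    rw [PySem.List.foldl_congr_mem _ _
        (fun (st : Int × Int × Int) j => pvStepB st (pvMapv (PySem.List.pyGetD word.toList j ' '))) _
        (by intro acc j _; rfl)]
    rw [PySem.List.foldl_pyRange_pyGetD' word.toList ' '
        (fun st c => pvStepB st (pvMapv c)) (0, 0, ans) hi']
    rw [← List.foldl_map, List.map_drop]
    rw [pvFoldB]

-- ===== VERDICT (by name: the statement is the Claim_ definition above) =====
theorem countDivisibleSubstrings_spec : Claim_equal_countDivisibleSubstrings := by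
  intro word _hdom hpre0
  have hpre : ∀ c ∈ word.toList, 97 ≤ c.toNat ∧ c.toNat ≤ 122 := by
    intro c hc
    have := List.all_eq_true.mp hpre0 c hc
    simpa using this
  unfold Spec_countDivisibleSubstrings
  rw [pvA_eq, pvB_eq]
  set l := word.toList.map pvMapv with hl
  have hbound : ∀ x ∈ l, 1 ≤ x ∧ x ≤ 9 := by
    intro x hx
    obtain ⟨c, hc, rfl⟩ := List.mem_map.mp hx
    exact pvMapv_bound c (hpre c hc).1 (hpre c hc).2
  set n := word.toList.length with hn
  have hln : l.length = n := by simp [hl, hn]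
  have hseg : ∀ i k : ℕ, pvP l (i + k) - pvP l i = ((l.drop i).take k).sum :=
    fun i k => pvSegment l i k
  -- A side: per-mean sums, then swap, then the divisibility bridge
  have hA : ∑ k ∈ Finset.range 9, pvPairCount [0] (pvPrefs (l.map (fun x => x - (1+(k:Int)))) 0)
      = ∑ j ∈ Finset.range (n+1), ∑ i ∈ Finset.range j,
          (if PySem.Int.mod (pvP l j - pvP l i) ((j:Int)-(i:Int)) = 0 then (1:Int) else 0) := by
    have h1 : ∑ k ∈ Finset.range 9, pvPairCount [0] (pvPrefs (l.map (fun x => x - (1+(k:Int)))) 0)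
        = ∑ k ∈ Finset.range 9, ∑ j ∈ Finset.range (l.length+1), ∑ i ∈ Finset.range j,
            (if pvP l j - pvP l i = (1+(k:Int)) * ((j:Int)-(i:Int)) then (1:Int) else 0) :=
      Finset.sum_congr rfl fun k _ => pvSolveSum l (1+(k:Int))
    rw [h1, hln, Finset.sum_comm]
    apply Finset.sum_congr rfl
    intro j hj
    rw [Finset.sum_comm]
    apply Finset.sum_congr rfl
    intro i hi
    have hij : i < j := Finset.mem_range.mp hi
    have hjn : j < n + 1 := Finset.mem_range.mp hj
    have hs : pvP l j - pvP l i = ((l.drop i).take (j-i)).sum := by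
      have := hseg i (j - i)
      rwa [show i + (j-i) = j from by omega] at this
    have hlen2 : (((l.drop i).take (j-i)).length : Int) = (j:Int) - (i:Int) := by
      rw [List.length_take, List.length_drop]
      push_cast [hln]
      omega
    have hb := pvSumBounds ((l.drop i).take (j-i))
      (fun x hx => hbound x (List.mem_of_mem_drop (List.mem_of_mem_take hx)))
    apply pvBridge
    · omega
    · rw [hs, ← hlen2]; exact hb.1
    · rw [hs, ← hlen2]; exact hb.2
  rw [hA, ← pvTri n (fun i j =>
      if PySem.Int.mod (pvP l j - pvP l i) ((j:Int)-(i:Int)) = 0 then (1:Int) else 0)]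
  -- B side: each inner loop is the same row of indicators
  apply (Finset.sum_congr rfl ?_).symm
  intro i hi
  have hin : i < n := Finset.mem_range.mp hi
  rw [pvInner_eq]
  rw [show (l.drop i).length = n - i from by rw [List.length_drop, hln]]
  apply Finset.sum_congr rfl
  intro k hk
  have hkn : k < n - i := Finset.mem_range.mp hk
  have hs : pvP l (i+k+1) - pvP l i = ((l.drop i).take (k+1)).sum := hseg i (k+1)
  simp only [zero_add]
  rw [← hs]
  rw [show ((i+k+1:ℕ):Int) - (i:Int) = ((k:Int)+1) from by push_cast; ring]
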